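-- pv_equiv track=rewrite | github.com/reyco2000/Vintage-Image-Viewer | vintage_image_viewer.py | _decode_pic_bitmap
-- ===== SOURCE A (Python) =====
-- def _decode_pic_bitmap(data, width, height):
--     """Decode bitmap data (1-bit per pixel)"""
--     pixels = []
--     target_pixels = width * height
--
--     for byte in data:
--         # Expand each bit to a pixel
--         for bit in range(7, -1, -1):
--             pixel_value = 255 if (byte >> bit) & 1 else 0
--             pixels.append(pixel_value)
--             if len(pixels) >= target_pixels:
--                 break
--         if len(pixels) >= target_pixels:
--             break
--
--     # Pad if needed
--     while len(pixels) < target_pixels: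
--         pixels.append(0)
--
--     return pixels[:target_pixels]
-- ===== SOURCE B (Python) =====
-- # Output-indexed alternative: each of the n=width*height output pixels addresses its
-- # bit directly (byte i//8, bit 7-i%8); no byte loop, no padding or truncation stages.
-- def _decode_pic_bitmap(data, width, height):
--     n = width * height
--     k = len(data)
--     return [255 if i // 8 < k and (data[i // 8] >> (7 - i % 8)) & 1 else 0
--             for i in range(n)]
-- ===== Notes on version B (the rewrite author's own statement) =====
-- stated objective: alternative
-- what changed: Inverts the traversal: instead of A's input-driven byte loop with per-bit early exits plus separate padding and truncation passes, B is a single output-indexed comprehension over the n pixel positions, each pixel read by direct bit addressing data[i//8] >> (7 - i%8), with out-of-data positions yielding 0 so padding and truncation disappear.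
import Mathlib
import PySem

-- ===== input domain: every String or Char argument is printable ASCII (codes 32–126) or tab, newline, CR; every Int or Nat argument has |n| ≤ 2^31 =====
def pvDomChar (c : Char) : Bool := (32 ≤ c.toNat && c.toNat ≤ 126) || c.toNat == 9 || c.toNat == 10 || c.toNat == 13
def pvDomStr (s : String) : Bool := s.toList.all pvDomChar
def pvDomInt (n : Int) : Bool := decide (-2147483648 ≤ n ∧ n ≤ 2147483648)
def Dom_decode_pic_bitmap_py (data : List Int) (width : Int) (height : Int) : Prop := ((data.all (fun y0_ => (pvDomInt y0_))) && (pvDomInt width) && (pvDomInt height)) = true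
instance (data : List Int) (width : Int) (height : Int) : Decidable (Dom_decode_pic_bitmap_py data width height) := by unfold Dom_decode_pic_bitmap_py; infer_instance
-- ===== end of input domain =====

-- B inverts the traversal: a single output-indexed comprehension over the n pixel positions
-- with direct bit addressing data[i//8] >> (7 - i%8), replacing A's input-driven byte loop
-- with early exits plus separate padding and truncation passes.

-- ===== PORT A =====
-- range(7, -1, -1)
def pvA_bits : List Nat := [7, 6, 5, 4, 3, 2, 1, 0]

-- inner 'for bit in range(7,-1,-1)' loop with its break
def pvA_inner (byte target : Int) : List Nat → List Int → List Int
  | [], pixels => pixels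
  | bit :: rest, pixels =>
    let pv : Int := if PySem.Int.band (byte >>> bit) 1 ≠ 0 then 255 else 0
    let pixels' := pixels ++ [pv]
    if target ≤ (pixels'.length : Int) then pixels'
    else pvA_inner byte target rest pixels'

-- outer 'for byte in data' loop with its break
def pvA_outer (target : Int) : List Int → List Int → List Int
  | [], pixels => pixels
  | byte :: rest, pixels =>
    let pixels' := pvA_inner byte target pvA_bits pixels
    if target ≤ (pixels'.length : Int) then pixels'
    else pvA_outer target rest pixels'

-- 'while len(pixels) < target_pixels: pixels.append(0)'
def pvA_pad (target : Int) (pixels : List Int) : List Int :=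
  if h : (pixels.length : Int) < target then pvA_pad target (pixels ++ [0]) else pixels
termination_by (target - pixels.length).toNat
decreasing_by simp; omega

def decode_pic_bitmap_py (data : List Int) (width : Int) (height : Int) : List Int :=
  let target := width * height
  let pixels := pvA_outer target data []
  let pixels := pvA_pad target pixels
  PySem.List.slice pixels none (some target)

-- ===== PORT B =====
-- [255 if i//8 < k and (data[i//8] >> (7 - i%8)) & 1 else 0 for i in range(n)]
-- data[i//8] is guarded by i//8 < k, so the Python indexing never raises; getD is exact here.
def decode_pic_bitmap_py_alt (data : List Int) (width : Int) (height : Int) : List Int :=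
  let n := width * height
  let k := data.length
  (List.range n.toNat).map (fun i =>
    if i / 8 < k ∧ PySem.Int.band ((data.getD (i / 8) 0) >>> (7 - i % 8)) 1 ≠ 0
    then (255 : Int) else 0)

-- ===== PRECONDITION & SPEC =====
def Spec_decode_pic_bitmap_py (data : List Int) (width : Int) (height : Int) (out : List Int) : Prop := out = decode_pic_bitmap_py_alt data width height
instance (data : List Int) (width : Int) (height : Int) (out : List Int) : Decidable (Spec_decode_pic_bitmap_py data width height out) := by unfold Spec_decode_pic_bitmap_py; infer_instance

-- ===== CLAIM (what is proved, stated in full; the proofs are below) =====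
def Claim_equal_decode_pic_bitmap_py : Prop := ∀ (data : List Int) (width : Int) (height : Int), Dom_decode_pic_bitmap_py data width height → Spec_decode_pic_bitmap_py data width height (decode_pic_bitmap_py data width height)

-- ===== LEMMAS AND PROOFS =====

-- proof-side: one pixel / one byte's 8 pixels, MSB first
def pvPix (byte : Int) (b : Nat) : Int :=
  if PySem.Int.band (byte >>> b) 1 ≠ 0 then 255 else 0

def pvRow (byte : Int) : List Int := pvA_bits.map (pvPix byte)

theorem pvPix_fold (byte : Int) (b : Nat) :
    (if PySem.Int.band (byte >>> b) 1 ≠ 0 then (255 : Int) else 0) = pvPix byte b := rfl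

theorem pvA_inner_eq (byte target : Int) (bits : List Nat) (pixels : List Int)
    (h : (pixels.length : Int) < target) :
    pvA_inner byte target bits pixels = (pixels ++ bits.map (pvPix byte)).take target.toNat := by
  induction bits generalizing pixels with
  | nil =>
    have hle : pixels.length ≤ target.toNat := by omega
    simp [pvA_inner, List.take_of_length_le hle]
  | cons bit rest ih =>
    simp only [pvA_inner, pvPix_fold, List.map_cons]
    split
    · next hbr =>
      have heq : pixels ++ pvPix byte bit :: List.map (pvPix byte) rest
          = (pixels ++ [pvPix byte bit]) ++ List.map (pvPix byte) rest := by simp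
      have ht : target.toNat = (pixels ++ [pvPix byte bit]).length := by
        simp at hbr ⊢; omega
      rw [ht, heq, List.take_left]
    · next hbr =>
      rw [ih _ (by simp at hbr ⊢; omega)]
      simp

theorem pvRow_fold (byte : Int) : List.map (pvPix byte) pvA_bits = pvRow byte := rfl

theorem pvRow_length (byte : Int) : (pvRow byte).length = 8 := by
  simp [pvRow, pvA_bits]

theorem pvA_outer_eq (target : Int) (data pixels : List Int)
    (h : (pixels.length : Int) < target) :
    pvA_outer target data pixels = (pixels ++ data.flatMap pvRow).take target.toNat := by
  induction data generalizing pixels with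
  | nil =>
    have hle : pixels.length ≤ target.toNat := by omega
    simp [pvA_outer, List.take_of_length_le hle]
  | cons byte rest ih =>
    simp only [pvA_outer, List.flatMap_cons]
    rw [pvA_inner_eq byte target pvA_bits pixels h, pvRow_fold]
    split
    · next hbr =>
      have hL : target.toNat ≤ (pixels ++ pvRow byte).length := by
        simp [List.length_take, List.length_append, pvRow_length] at hbr ⊢; omega
      rw [← List.append_assoc, List.take_append_of_le_length hL]
    · next hbr =>
      have hsmall : pixels.length + 8 ≤ target.toNat := by
        simp [List.length_take, List.length_append, pvRow_length] at hbr; omega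
      have hfull : (pixels ++ pvRow byte).take target.toNat = pixels ++ pvRow byte :=
        List.take_of_length_le (by rw [List.length_append, pvRow_length]; omega)
      rw [hfull] at hbr ⊢
      rw [ih _ (by exact not_le.mp hbr), List.append_assoc]

theorem pvA_pad_eq (target : Int) (pixels : List Int) :
    pvA_pad target pixels = pixels ++ List.replicate (target - pixels.length).toNat 0 := by
  induction pixels using pvA_pad.induct (target := target) with
  | case1 pixels h ih =>
    rw [pvA_pad, dif_pos h, ih, List.append_assoc]
    congr 1
    have hk : (target - (pixels.length : Int)).toNat
        = (target - ((pixels ++ [0]).length : Int)).toNat + 1 := by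
      rw [List.length_append]; simp; omega
    rw [hk, List.replicate_succ]
    rfl
  | case2 pixels h =>
    have hz : (target - (pixels.length : Int)).toNat = 0 := by omega
    rw [pvA_pad, dif_neg h, hz]
    simp

theorem pvRow_getElem (byte : Int) (i : Nat) (h : i < (pvRow byte).length) (h8 : i < 8) :
    (pvRow byte)[i] = pvPix byte (7 - i) := by
  interval_cases i <;> rfl

theorem pvFlatMap_length (data : List Int) : (data.flatMap pvRow).length = 8 * data.length := by
  induction data with
  | nil => simp
  | cons byte rest ih => simp [List.flatMap_cons, pvRow_length, ih]; ring

theorem pvE_get (data : List Int) (i : Nat) (h : i < (data.flatMap pvRow).length) :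
    (data.flatMap pvRow)[i] = pvPix (data.getD (i / 8) 0) (7 - i % 8) := by
  induction data generalizing i with
  | nil => simp at h
  | cons byte rest ih =>
    simp only [List.flatMap_cons] at h ⊢
    by_cases h8 : i < 8
    · rw [List.getElem_append_left (by rw [pvRow_length]; omega)]
      have hq : i / 8 = 0 := by omega
      have hr : i % 8 = i := by omega
      rw [hq, hr]
      have hgd : (byte :: rest).getD 0 0 = byte := rfl
      rw [hgd]
      exact pvRow_getElem byte i (by rw [pvRow_length]; omega) h8
    · rw [List.getElem_append_right (by rw [pvRow_length]; omega)]
      have := ih (i - (pvRow byte).length)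
        (by simp only [List.length_append, pvRow_length] at h ⊢; omega)
      rw [this]
      have hq : (i - (pvRow byte).length) / 8 = i / 8 - 1 := by rw [pvRow_length]; omega
      have hr : (i - (pvRow byte).length) % 8 = i % 8 := by rw [pvRow_length]; omega
      have hq1 : 1 ≤ i / 8 := by omega
      rw [hq, hr]
      congr 1
      show rest.getD (i / 8 - 1) 0 = (byte :: rest).getD (i / 8) 0
      rcases Nat.exists_eq_add_of_le hq1 with ⟨m, hm⟩
      rw [hm, Nat.add_comm]
      simp [List.getD]

theorem pvSlice_to (xs : List Int) (n : Int) :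
    PySem.List.slice xs none (some n) = xs.take (PySem.List.clampIdx xs.length n) := by
  simp [PySem.List.slice, PySem.List.clampIdx]

theorem pvSlice_nonpos (xs : List Int) (n : Int) (hn : n ≤ 0) (hlen : xs.length ≤ 1) :
    PySem.List.slice xs none (some n) = [] := by
  rw [pvSlice_to]
  have h : PySem.List.clampIdx xs.length n = 0 := by
    unfold PySem.List.clampIdx; split_ifs <;> omega
  rw [h, List.take_zero]

theorem pvA_nonpos (n : Int) (hn : n ≤ 0) (data : List Int) :
    PySem.List.slice (pvA_pad n (pvA_outer n data [])) none (some n) = [] := by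
  have hpad : ∀ pix : List Int, pvA_pad n pix = pix := by
    intro pix; rw [pvA_pad, dif_neg (by omega)]
  cases data with
  | nil =>
    rw [pvA_outer, hpad]
    exact pvSlice_nonpos [] n hn (by simp)
  | cons byte rest =>
    have hinner : pvA_inner byte n pvA_bits [] = [pvPix byte 7] := by
      rw [pvA_bits, pvA_inner, pvPix_fold, if_pos (by simp; omega)]
      simp
    have houter : pvA_outer n (byte :: rest) [] = [pvPix byte 7] := by
      rw [pvA_outer, hinner, if_pos (by simp; omega)]
    rw [houter, hpad]
    exact pvSlice_nonpos _ n hn (by simp)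

-- B's comprehension equals "take then pad" over the flatMap expansion
theorem pvB_map_eq (data : List Int) (t : Nat) :
    (List.range t).map (fun i =>
        if i / 8 < data.length ∧
            PySem.Int.band ((data.getD (i / 8) 0) >>> (7 - i % 8)) 1 ≠ 0
        then (255 : Int) else 0)
      = (data.flatMap pvRow).take t ++ List.replicate (t - 8 * data.length) 0 := by
  set d := data.length with hd
  set E := data.flatMap pvRow with hE
  have hEl : E.length = 8 * d := pvFlatMap_length data
  apply List.ext_getElem
  · simp [hEl]; omega
  · intro i h1 h2
    simp only [List.length_map, List.length_range] at h1
    rw [List.getElem_map, List.getElem_range]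
    by_cases hlt : i < 8 * d
    · rw [List.getElem_append_left (by simp only [List.length_take, hEl]; omega),
        List.getElem_take, pvE_get data i (by rw [← hE, hEl]; omega)]
      have hg : i / 8 < d := by omega
      simp only [pvPix, hg, true_and]
    · rw [List.getElem_append_right (by simp only [List.length_take, hEl]; omega)]
      have hg : ¬ (i / 8 < d) := by omega
      rw [if_neg (by tauto), List.getElem_replicate]

-- ===== VERDICT (by name: the statement is the Claim_ definition above) =====
theorem decode_pic_bitmap_py_spec : Claim_equal_decode_pic_bitmap_py := by
  intro data width height _hdom
  unfold Spec_decode_pic_bitmap_py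
  simp only [decode_pic_bitmap_py, decode_pic_bitmap_py_alt]
  by_cases hn : width * height ≤ 0
  · rw [pvA_nonpos (width * height) hn data]
    have ht : (width * height).toNat = 0 := by omega
    rw [ht]
    simp
  · set n : Int := width * height with hn_def
    set t : Nat := n.toNat with ht_def
    set d : Nat := data.length with hd_def
    set E : List Int := data.flatMap pvRow with hE_def
    have hp : 0 < n := by omega
    have hEl : E.length = 8 * d := pvFlatMap_length data
    have hA : pvA_outer n data [] = E.take t := by
      simpa using pvA_outer_eq n data [] (by simp; omega)
    rw [hA, pvA_pad_eq, pvB_map_eq data t, pvSlice_to]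
    have hlen1 : (E.take t).length = min t (8 * d) := by simp [hEl]
    have hpadn : (n - ((E.take t).length : Int)).toNat = t - min t (8 * d) := by
      rw [hlen1]; omega
    rw [hpadn]
    have hlenT : ((E.take t) ++ List.replicate (t - min t (8 * d)) 0).length = t := by
      rw [List.length_append, List.length_replicate, hlen1]; omega
    have hclamp : PySem.List.clampIdx
        ((E.take t) ++ List.replicate (t - min t (8 * d)) 0).length n = t := by
      rw [hlenT]; unfold PySem.List.clampIdx; split_ifs <;> omega
    rw [hclamp, List.take_of_length_le (by rw [hlenT])]
    congr 2
    omega
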